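-- pv_equiv track=rewrite | github.com/Yashwanth25M/Daily-website-scraper-with-diff-alerts-full-domain-crawl | frontend/app.py | extract_before_after
-- ===== SOURCE A (Python) =====
-- def extract_before_after(diff_text):
--     """
--     Extracts one meaningful before/after change from diff text.
--     Returns (before, after).
--     """
--     before = None
--     after = None
--
--     for line in diff_text.splitlines():
--         if line.startswith("-") and not line.startswith("---"):
--             text = line[1:].strip()
--             if text:
--                 before = text
--         elif line.startswith("+") and not line.startswith("+++"):
--             text = line[1:].strip()
--             if text:
--                 after = text
--
--     return before, after
-- ===== SOURCE B (Python) =====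
-- def _last_change(lines, sign, header):
--     vals = [ln[1:].strip() for ln in lines
--             if ln.startswith(sign) and not ln.startswith(header)]
--     vals = [v for v in vals if v]
--     return vals[-1] if vals else None
--
--
-- def extract_before_after(diff_text):
--     """
--     Extracts one meaningful before/after change from diff text.
--     Returns (before, after).
--     """
--     lines = diff_text.splitlines()
--     return _last_change(lines, "-", "---"), _last_change(lines, "+", "+++")
-- ===== Notes on version B (the rewrite author's own statement) =====
-- stated objective: simpler
-- what changed: B replaces A's single stateful overwrite loop by two staged list-comprehension passes per diff sign (collect stripped candidate texts, drop empties, take the last), via one shared helper used for removals and additions.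
import Mathlib
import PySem

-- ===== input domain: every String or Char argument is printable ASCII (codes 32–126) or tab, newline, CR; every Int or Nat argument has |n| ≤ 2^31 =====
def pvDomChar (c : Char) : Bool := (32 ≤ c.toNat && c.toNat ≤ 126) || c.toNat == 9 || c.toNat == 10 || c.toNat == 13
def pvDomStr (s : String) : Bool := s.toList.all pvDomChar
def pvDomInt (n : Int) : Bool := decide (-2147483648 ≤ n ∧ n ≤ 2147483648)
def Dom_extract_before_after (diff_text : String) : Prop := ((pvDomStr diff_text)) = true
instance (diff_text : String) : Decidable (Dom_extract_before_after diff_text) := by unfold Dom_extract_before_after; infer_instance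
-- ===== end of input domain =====

-- B replaces A's single stateful overwrite loop by two staged comprehension passes per sign
-- (collect stripped candidates, drop empties, take the last) via a shared helper (simpler).

-- ===== PORT A =====
-- literal port of A: forward fold over the lines, overwriting before/after on each match
def extract_before_after (diff_text : String) : Option String × Option String :=
  (PySem.Str.splitlines diff_text).foldl
    (fun (st : Option String × Option String) line =>
      if PySem.Str.startswith line "-" && !(PySem.Str.startswith line "---") then
        let text := PySem.Str.strip (PySem.Str.slice line (some 1) none)
        if text ≠ "" then (some text, st.2) else st
      else if PySem.Str.startswith line "+" && !(PySem.Str.startswith line "+++") then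
        let text := PySem.Str.strip (PySem.Str.slice line (some 1) none)
        if text ≠ "" then (st.1, some text) else st
      else st)
    (none, none)

-- ===== PORT B =====
-- literal port of Source B's _last_change: comprehension, empty filter, last element
def ebaLastChange (lines : List String) (sign header : String) : Option String :=
  let vals := lines.filterMap (fun ln =>
    if PySem.Str.startswith ln sign && !(PySem.Str.startswith ln header) then
      some (PySem.Str.strip (PySem.Str.slice ln (some 1) none))
    else none)
  let vals := vals.filter (fun v => v != "")
  vals.getLast?

def extract_before_after_alt (diff_text : String) : Option String × Option String :=
  let lines := PySem.Str.splitlines diff_text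
  (ebaLastChange lines "-" "---", ebaLastChange lines "+" "+++")

-- ===== PRECONDITION & SPEC =====
def Spec_extract_before_after (diff_text : String) (out : Option String × Option String) : Prop := out = extract_before_after_alt diff_text
instance (diff_text : String) (out : Option String × Option String) : Decidable (Spec_extract_before_after diff_text out) := by unfold Spec_extract_before_after; infer_instance

-- ===== CLAIM (what is proved, stated in full; the proofs are below) =====
def Claim_equal_extract_before_after : Prop := ∀ (diff_text : String), Dom_extract_before_after diff_text → Spec_extract_before_after diff_text (extract_before_after diff_text)

-- ===== LEMMAS AND PROOFS =====

-- the value a matching '-'-line contributes (none if the line does not qualify)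
def minusOf (line : String) : Option String :=
  if PySem.Str.startswith line "-" && !(PySem.Str.startswith line "---") then
    let text := PySem.Str.strip (PySem.Str.slice line (some 1) none)
    if text ≠ "" then some text else none
  else none

def plusOf (line : String) : Option String :=
  if PySem.Str.startswith line "+" && !(PySem.Str.startswith line "+++") then
    let text := PySem.Str.strip (PySem.Str.slice line (some 1) none)
    if text ≠ "" then some text else none
  else none

-- a line starting with '-' does not start with '+'
lemma chars_minus_not_plus (l : List Char) (h : PySem.Chars.startswith l ['-'] = true) :
    PySem.Chars.startswith l ['+'] = false := by
  rw [PySem.Chars.startswith_iff] at h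
  rw [Bool.eq_false_iff]
  intro hp
  rw [PySem.Chars.startswith_iff] at hp
  obtain ⟨t1, rfl⟩ := h
  obtain ⟨t2, e2⟩ := hp
  simp at e2

-- A's loop body in terms of minusOf/plusOf (later value overwrites)
lemma stepA_eq (st : Option String × Option String) (line : String) :
    (if PySem.Str.startswith line "-" && !(PySem.Str.startswith line "---") then
        let text := PySem.Str.strip (PySem.Str.slice line (some 1) none)
        if text ≠ "" then ((some text, st.2) : Option String × Option String) else st
      else if PySem.Str.startswith line "+" && !(PySem.Str.startswith line "+++") then
        let text := PySem.Str.strip (PySem.Str.slice line (some 1) none)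
        if text ≠ "" then (st.1, some text) else st
      else st)
    = ((minusOf line).or st.1, (plusOf line).or st.2) := by
  by_cases hm1 : PySem.Chars.startswith line.toList ['-'] = true
  · have hp1 := chars_minus_not_plus line.toList hm1
    by_cases hm3 : PySem.Chars.startswith line.toList ['-', '-', '-'] = true
    · simp [minusOf, plusOf, hm1, hm3, hp1]
    · by_cases ht : PySem.Str.strip (PySem.Str.slice line (some 1) none) = "" <;>
        simp [minusOf, plusOf, hm1, hm3, hp1, ht]
  · by_cases hp1 : PySem.Chars.startswith line.toList ['+'] = true
    · by_cases hp3 : PySem.Chars.startswith line.toList ['+', '+', '+'] = true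
      · simp [minusOf, plusOf, hm1, hp1, hp3]
      · by_cases ht : PySem.Str.strip (PySem.Str.slice line (some 1) none) = "" <;>
          simp [minusOf, plusOf, hm1, hp1, hp3, ht]
    · simp [minusOf, plusOf, hm1, hp1]

lemma cons_getLast?_or {α : Type} (t : α) (L : List α) (b : Option α) :
    (t :: L).getLast?.or b = L.getLast?.or (some t) := by
  induction L with
  | nil => simp
  | cons y ys _ =>
    rw [List.getLast?_cons_cons]
    have hs : (y :: ys).getLast?.isSome := by
      simp [List.getLast?_isSome]
    obtain ⟨v, hv⟩ := Option.isSome_iff_exists.mp hs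
    rw [hv]
    simp

-- A's fold keeps the LAST qualifying '-' line and the LAST qualifying '+' line
lemma foldA_eq (l : List String) (b a : Option String) :
    l.foldl
      (fun (st : Option String × Option String) line =>
        if PySem.Str.startswith line "-" && !(PySem.Str.startswith line "---") then
          let text := PySem.Str.strip (PySem.Str.slice line (some 1) none)
          if text ≠ "" then (some text, st.2) else st
        else if PySem.Str.startswith line "+" && !(PySem.Str.startswith line "+++") then
          let text := PySem.Str.strip (PySem.Str.slice line (some 1) none)
          if text ≠ "" then (st.1, some text) else st
        else st)
      (b, a)
    = ((l.filterMap minusOf).getLast?.or b, (l.filterMap plusOf).getLast?.or a) := by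
  induction l generalizing b a with
  | nil => simp
  | cons x xs ih =>
    rw [List.foldl_cons, stepA_eq (b, a) x, ih]
    cases hx : minusOf x <;> cases hx' : plusOf x <;>
      simp [hx, hx', cons_getLast?_or]

-- B's staged passes compute exactly filterMap minusOf / plusOf followed by getLast?
lemma lastChange_minus (l : List String) :
    ebaLastChange l "-" "---" = (l.filterMap minusOf).getLast? := by
  show ((l.filterMap (fun ln =>
      if PySem.Str.startswith ln "-" && !(PySem.Str.startswith ln "---") then
        some (PySem.Str.strip (PySem.Str.slice ln (some 1) none))
      else none)).filter (fun v => v != "")).getLast? = (l.filterMap minusOf).getLast?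
  rw [List.filter_filterMap]
  congr 1
  apply List.filterMap_congr
  intro ln _
  unfold minusOf
  split_ifs <;> simp_all [Option.filter]

lemma lastChange_plus (l : List String) :
    ebaLastChange l "+" "+++" = (l.filterMap plusOf).getLast? := by
  show ((l.filterMap (fun ln =>
      if PySem.Str.startswith ln "+" && !(PySem.Str.startswith ln "+++") then
        some (PySem.Str.strip (PySem.Str.slice ln (some 1) none))
      else none)).filter (fun v => v != "")).getLast? = (l.filterMap plusOf).getLast?
  rw [List.filter_filterMap]
  congr 1
  apply List.filterMap_congr
  intro ln _
  unfold plusOf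
  split_ifs <;> simp_all [Option.filter]

-- ===== VERDICT (by name: the statement is the Claim_ definition above) =====
theorem extract_before_after_spec : Claim_equal_extract_before_after := by
  intro d _
  unfold Spec_extract_before_after extract_before_after
  rw [foldA_eq]
  show _ = (ebaLastChange (PySem.Str.splitlines d) "-" "---",
            ebaLastChange (PySem.Str.splitlines d) "+" "+++")
  rw [lastChange_minus, lastChange_plus]
  simp
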